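-- pv_equiv track=rewrite | github.com/DK-codeur/python_exos | TEST1/prim_interval.py | prime_interval
-- ===== SOURCE A (Python) =====
-- from math import sqrt
--
-- def is_prime(n):
--     racine = int(sqrt(n))
--     premier = False
--     if n==2 or n==3:
--         premier=True
--     else:
--         i=2
--         while i<racine:
--             if n%i==0:
--                 premier=False
--                 break
--             else:
--                 premier = True
--             i+=1
--     return premier
--
-- def prime_interval(n):
--     if 0<=n<=500:
--         if n==500:
--             result = [499]
--         elif n==499:
--             result = [491, 499]
--         elif n>=2:
--             if is_prime(n):
--                 if n==2:
--                     result = [2, 3]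
--                 else:
--                     s=n-1
--                     while is_prime(s)==False:
--                         s-=1
--                     pre = s
--                     p=n+1
--                     while is_prime(p)==False:
--                         p+=1
--                     post = p
--                     result = [pre, n, post]
--             elif is_prime(n)==False:
--                 s=n
--                 while is_prime(s)==False:
--                     s-=1
--                 pre =s
--                 p=n
--                 while is_prime(p)==False:
--                     p+=1
--                 post = p
--                 result = [pre, post]
--         else:
--             result = [2]
--         return result
-- ===== SOURCE B (Python) =====
-- from math import sqrt
--
-- def is_prime(n):
--     racine = int(sqrt(n))
--     premier = False
--     if n==2 or n==3:
--         premier=True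
--     else:
--         i=2
--         while i<racine:
--             if n%i==0:
--                 premier=False
--                 break
--             else:
--                 premier = True
--             i+=1
--     return premier
--
-- PRIMES = [k for k in range(501) if is_prime(k)]
--
-- def prime_interval(n):
--     if not 0 <= n <= 500:
--         return None
--     if n == 500:
--         return [499]
--     if n == 499:
--         return [491, 499]
--     if n < 2:
--         return [2]
--     if n == 2:
--         return [2, 3]
--     pre = max(p for p in PRIMES if p < n)
--     post = min(p for p in PRIMES if p > n)
--     if n in PRIMES:
--         return [pre, n, post]
--     return [pre, post]
-- ===== Notes on version B (the rewrite author's own statement) =====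
-- stated objective: alternative
-- what changed: B precomputes once the table of numbers 0..500 accepted by the (kept, verbatim) buggy is_prime and answers each query by table lookups (max below n / min above n / membership) instead of A's four hand-written upward/downward while-loop scans.
-- outside the precondition, e.g. on prime_interval(-1): A returns None, B returns None; on prime_interval(501): A returns None, B returns None
import Mathlib
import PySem

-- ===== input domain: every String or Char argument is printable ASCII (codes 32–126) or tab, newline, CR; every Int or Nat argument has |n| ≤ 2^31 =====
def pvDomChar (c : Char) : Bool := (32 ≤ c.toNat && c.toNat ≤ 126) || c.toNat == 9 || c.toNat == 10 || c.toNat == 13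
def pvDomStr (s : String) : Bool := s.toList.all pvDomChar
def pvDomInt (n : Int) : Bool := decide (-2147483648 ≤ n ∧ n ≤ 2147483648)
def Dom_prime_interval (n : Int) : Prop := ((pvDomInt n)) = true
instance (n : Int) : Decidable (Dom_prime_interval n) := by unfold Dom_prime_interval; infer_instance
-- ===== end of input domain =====

-- B replaces A's four hand-written neighbour-search while-loops by one precomputed table of
-- (buggy-)primes 0..500 plus max/min lookups over it (objective: alternative decomposition).

-- ===== PORT A =====
-- the buggy is_prime helper shared verbatim by both Python versions (A's module and Source B define it identically)
-- while i < racine loop of is_prime; state (i, premier); the fuel only bounds the step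
-- count structurally (racine ≤ 22 on every reachable argument, so 30 steps always suffice)
def pvIsPrimeLoop (fuel : Nat) (n racine i : Int) (premier : Bool) : Bool :=
  match fuel with
  | 0 => premier
  | f + 1 =>
    if i < racine then
      if PySem.Int.mod n i == 0 then false
      else pvIsPrimeLoop f n racine (i + 1) true
    else premier

def pvIsPrime (n : Int) : Bool :=
  -- int(sqrt(n)): equals the integer square root on every argument reached here (0 ≤ n ≤ 501,
  -- where float sqrt + int() truncation is exact); computed as a kernel-reducible count of
  -- r ∈ 1..29 with r² ≤ n (exact for n.toNat ≤ 900)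
  let racine : Int := ((((List.range 29).filter (fun r => (r + 1) * (r + 1) ≤ n.toNat)).length : Nat) : Int)
  if n == 2 || n == 3 then true
  else pvIsPrimeLoop 30 n racine 2 false

-- while is_prime(s)==False: s -= 1   (fuel only makes the loop total; 600 steps always suffice
-- on the inputs Pre_ admits, since 2 and 3 are buggy-primes below every start point)
def pvDown (fuel : Nat) (s : Int) : Int :=
  match fuel with
  | 0 => s
  | f + 1 => if pvIsPrime s == false then pvDown f (s - 1) else s

-- while is_prime(p)==False: p += 1
def pvUp (fuel : Nat) (p : Int) : Int :=
  match fuel with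
  | 0 => p
  | f + 1 => if pvIsPrime p == false then pvUp f (p + 1) else p

def prime_interval (n : Int) : List Int :=
  if 0 ≤ n ∧ n ≤ 500 then
    if n == 500 then [499]
    else if n == 499 then [491, 499]
    else if n ≥ 2 then
      if pvIsPrime n then
        if n == 2 then [2, 3]
        else [pvDown 600 (n - 1), n, pvUp 600 (n + 1)]
      else if pvIsPrime n == false then [pvDown 600 n, pvUp 600 n]
      else []  -- dead elif-fallthrough (Python would hit NameError; never reached)
    else [2]
  else []  -- Python returns None here; excluded by Pre_

-- ===== PORT B =====
-- PRIMES = [k for k in range(501) if is_prime(k)]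
def pvPrimes : List Int :=
  ((List.range 501).map (fun k => (k : Int))).filter (fun k => pvIsPrime k)

def prime_interval_alt (n : Int) : List Int :=
  if ¬(0 ≤ n ∧ n ≤ 500) then []  -- Python B returns None here; excluded by Pre_
  else if n == 500 then [499]
  else if n == 499 then [491, 499]
  else if n < 2 then [2]
  else if n == 2 then [2, 3]
  else
    -- max/min over a generator that is nonempty on every input reaching this branch;
    -- getD 0 only totalises (Python would raise ValueError on an empty one, which cannot happen)
    let pre := (PySem.List.max? (pvPrimes.filter (fun p => decide (p < n))) (fun x => x)).getD 0
    let post := (PySem.List.min? (pvPrimes.filter (fun p => decide (n < p))) (fun x => x)).getD 0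
    if pvPrimes.contains n then [pre, n, post] else [pre, post]

-- ===== PRECONDITION & SPEC =====
-- Pre_ excludes exactly the inputs n < 0 or n > 500, on which Python A falls through its outer
-- guard and returns None, which is not a value of type list[int].
def Pre_prime_interval (n : Int) : Prop := 0 ≤ n ∧ n ≤ 500
instance (n : Int) : Decidable (Pre_prime_interval n) := by unfold Pre_prime_interval; infer_instance
def pvWitness_prime_interval : Int := (7)

def Spec_prime_interval (n : Int) (out : List Int) : Prop := out = prime_interval_alt n
instance (n : Int) (out : List Int) : Decidable (Spec_prime_interval n out) := by unfold Spec_prime_interval; infer_instance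

-- ===== CLAIM (what is proved, stated in full; the proofs are below) =====
def Claim_equal_prime_interval : Prop := ∀ (n : Int), Dom_prime_interval n → Pre_prime_interval n → Spec_prime_interval n (prime_interval n)

-- ===== LEMMAS AND PROOFS =====
-- exhaustive check of the 501 admitted inputs
-- the table B precomputes, evaluated once
set_option maxRecDepth 10000 in
theorem pvPrimes_eq : pvPrimes = (([2, 3, 9, 11, 13, 15, 17, 19, 23, 25, 29, 31, 35, 37, 41, 43, 47, 49, 53, 59, 61, 67, 71, 73, 79, 83, 89, 97, 101, 103, 107, 109, 113, 121, 127, 131, 137, 139, 143, 149, 151, 157, 163, 167, 169, 173, 179, 181, 191, 193, 197, 199, 211, 223, 227, 229, 233, 239, 241, 251, 257, 263, 269, 271, 277, 281, 283, 289, 293, 307, 311, 313, 317, 323, 331, 337, 347, 349, 353, 359, 361, 367, 373, 379, 383, 389, 397, 401, 409, 419, 421, 431, 433, 439, 443, 449, 457, 461, 463, 467, 479, 487, 491, 499] : List Int)) := by decide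

set_option maxRecDepth 100000 in
set_option maxHeartbeats 2000000 in
theorem pv_all_agree :
    ((List.range 501).all (fun k => prime_interval (k : Int) == prime_interval_alt (k : Int))) = true := by
  simp only [prime_interval_alt, pvPrimes_eq]
  decide

-- ===== VERDICT (by name: the statement is the Claim_ definition above) =====
theorem prime_interval_spec : Claim_equal_prime_interval := by
  intro n _ hpre
  unfold Spec_prime_interval
  have hk : n = ((n.toNat : Nat) : Int) := by
    have := hpre.1; omega
  have hm : n.toNat ∈ List.range 501 := by
    rw [List.mem_range]; have := hpre.2; have := hpre.1; omega
  have h := List.all_eq_true.mp pv_all_agree _ hm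
  rw [hk]
  exact beq_iff_eq.mp h
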